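-- pv_equiv track=rewrite | github.com/TwitOrel/HomeWorksPartA | PartA/py/HW3/Stats.py | isDecreaseOrIncrease
-- ===== SOURCE A (Python) =====
-- def isDecreaseOrIncrease(myList):
--     decrease = True
--     increase = True
--
--     for i in range(len(myList)-1):
--         if myList[i] < myList[i+1]:
--             decrease = False
--         if myList[i] > myList[i+1]:
--             increase = False
--
--     if increase:
--         return "this is Increase Series"
--     if decrease:
--         return "this is Decrease Series"
--     if (increase and decrease) or (not decrease and not increase):
--         return "this is not Increase or Decrease Series"
-- ===== SOURCE B (Python) =====
-- def isDecreaseOrIncrease(myList):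
--     if myList == sorted(myList):
--         return "this is Increase Series"
--     if myList == sorted(myList, reverse=True):
--         return "this is Decrease Series"
--     return "this is not Increase or Decrease Series"
-- ===== Notes on version B (the rewrite author's own statement) =====
-- stated objective: simpler
-- what changed: Replaces the manual adjacent-pair scan with two flags by comparing the list against sorted(myList) and sorted(myList, reverse=True), keeping the non-decreasing-first priority.
import Mathlib
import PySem

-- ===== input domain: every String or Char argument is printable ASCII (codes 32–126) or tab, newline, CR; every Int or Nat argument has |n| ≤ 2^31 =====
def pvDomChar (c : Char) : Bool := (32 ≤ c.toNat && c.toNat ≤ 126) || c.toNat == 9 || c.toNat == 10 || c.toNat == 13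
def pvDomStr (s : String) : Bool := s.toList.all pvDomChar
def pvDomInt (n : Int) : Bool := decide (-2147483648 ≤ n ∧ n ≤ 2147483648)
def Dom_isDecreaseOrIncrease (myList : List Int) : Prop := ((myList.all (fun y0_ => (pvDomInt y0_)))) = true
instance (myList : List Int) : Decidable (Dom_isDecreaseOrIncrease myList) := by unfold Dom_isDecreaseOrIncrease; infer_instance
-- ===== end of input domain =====

-- B replaces A's adjacent-pair scan with equality against the two sorted forms (objective: simpler).

-- ===== PORT A =====
def isDecreaseOrIncrease (myList : List Int) : String :=
  let st := (PySem.List.pyRange 0 ((myList.length : Int) - 1) 1).foldl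
    (fun (s : Bool × Bool) i =>
      let d := if PySem.List.pyGetD myList i 0 < PySem.List.pyGetD myList (i+1) 0 then false else s.1
      let inc := if PySem.List.pyGetD myList i 0 > PySem.List.pyGetD myList (i+1) 0 then false else s.2
      (d, inc)) (true, true)
  if st.2 then "this is Increase Series"
  else if st.1 then "this is Decrease Series"
  else if (st.2 && st.1) || (!st.1 && !st.2) then "this is not Increase or Decrease Series"
  else ""  -- Python falls off the function (None) here; unreachable: st.1 = st.2 = false makes the guard true

-- ===== PORT B =====
def isDecreaseOrIncrease_alt (myList : List Int) : String :=
  if myList = PySem.List.sorted myList (fun x => x) false then "this is Increase Series"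
  else if myList = PySem.List.sorted myList (fun x => x) true then "this is Decrease Series"
  else "this is not Increase or Decrease Series"

-- ===== PRECONDITION & SPEC =====
def Spec_isDecreaseOrIncrease (myList : List Int) (out : String) : Prop := out = isDecreaseOrIncrease_alt myList
instance (myList : List Int) (out : String) : Decidable (Spec_isDecreaseOrIncrease myList out) := by unfold Spec_isDecreaseOrIncrease; infer_instance

-- ===== CLAIM (what is proved, stated in full; the proofs are below) =====
def Claim_equal_isDecreaseOrIncrease : Prop := ∀ (myList : List Int), Dom_isDecreaseOrIncrease myList → Spec_isDecreaseOrIncrease myList (isDecreaseOrIncrease myList)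

-- ===== LEMMAS AND PROOFS =====

-- A's fold: each flag is the conjunction of its per-index tests
lemma foldA_eq (l : List Int) (r : List Int) (s : Bool × Bool) :
    r.foldl
      (fun (s : Bool × Bool) i =>
        let d := if PySem.List.pyGetD l i 0 < PySem.List.pyGetD l (i+1) 0 then false else s.1
        let inc := if PySem.List.pyGetD l i 0 > PySem.List.pyGetD l (i+1) 0 then false else s.2
        (d, inc)) s
    = (s.1 && r.all (fun i => !decide (PySem.List.pyGetD l i 0 < PySem.List.pyGetD l (i+1) 0)),
       s.2 && r.all (fun i => !decide (PySem.List.pyGetD l i 0 > PySem.List.pyGetD l (i+1) 0))) := by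
  induction r generalizing s with
  | nil => simp
  | cons x r ih =>
    simp only [List.foldl_cons, List.all_cons, ih, Prod.mk.injEq]
    constructor <;> · split_ifs with h <;> simp [h]

-- the range-driven 'all' over index pairs, rephrased over natural indices
lemma all_range_iff (l : List Int) (c : Int → Int → Bool) :
    ((PySem.List.pyRange 0 ((l.length : Int) - 1) 1).all
        (fun i => !c (PySem.List.pyGetD l i 0) (PySem.List.pyGetD l (i+1) 0))) = true
      ↔ ∀ (k : Nat), k + 1 < l.length → ¬ c (l.getD k 0) (l.getD (k+1) 0) = true := by
  simp only [List.all_eq_true, Bool.not_eq_eq_eq_not, Bool.not_true, Bool.eq_false_iff, Ne]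
  constructor
  · intro h k hk
    have h' := h (k : Int) (PySem.List.mem_pyRange_one.2 ⟨by positivity, by omega⟩)
    have e : ((k : Int) + 1) = ((k + 1 : Nat) : Int) := by push_cast; ring
    rw [e, PySem.List.pyGetD_natCast, PySem.List.pyGetD_natCast] at h'
    exact h'
  · intro h i hmem
    rw [PySem.List.mem_pyRange_one] at hmem
    obtain ⟨h0, h1⟩ := hmem
    have e0 : i = ((i.toNat : Nat) : Int) := by omega
    have e : i + 1 = ((i.toNat + 1 : Nat) : Int) := by omega
    rw [e, e0, PySem.List.pyGetD_natCast, PySem.List.pyGetD_natCast]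
    exact h i.toNat (by omega)

-- adjacent comparisons extend to all pairs
lemma getD_mono_of_adj (l : List Int) (h : ∀ (k : Nat), k + 1 < l.length → l.getD k 0 ≤ l.getD (k+1) 0) :
    ∀ (j : Nat), j < l.length → ∀ i, i ≤ j → l.getD i 0 ≤ l.getD j 0 := by
  intro j
  induction j with
  | zero => intro _ i hij; interval_cases i; exact le_refl _
  | succ n ih =>
    intro hj i hij
    rcases Nat.eq_or_lt_of_le hij with rfl | hlt
    · exact le_refl _
    · exact le_trans (ih (by omega) i (by omega)) (h n hj)

lemma getD_anti_of_adj (l : List Int) (h : ∀ (k : Nat), k + 1 < l.length → l.getD (k+1) 0 ≤ l.getD k 0) :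
    ∀ (j : Nat), j < l.length → ∀ i, i ≤ j → l.getD j 0 ≤ l.getD i 0 := by
  intro j
  induction j with
  | zero => intro _ i hij; interval_cases i; exact le_refl _
  | succ n ih =>
    intro hj i hij
    rcases Nat.eq_or_lt_of_le hij with rfl | hlt
    · exact le_refl _
    · exact le_trans (h n hj) (ih (by omega) i (by omega))

-- non-decreasing ↔ list equals its sorted form
lemma eq_sorted_iff (l : List Int) :
    l = PySem.List.sorted l (fun x => x) false
      ↔ ∀ (k : Nat), k + 1 < l.length → ¬ decide (l.getD k 0 > l.getD (k+1) 0) = true := by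
  simp only [decide_eq_true_eq, not_lt, gt_iff_lt]
  constructor
  · intro h k hk
    have hp := PySem.List.sorted_pairwise (xs := l) (key := fun x => x)
    rw [← h] at hp
    have := List.pairwise_iff_getElem.1 hp k (k+1) (by omega) (by omega) (by omega)
    rwa [List.getD_eq_getElem l 0 (by omega), List.getD_eq_getElem l 0 (by omega)]
  · intro h
    have hp : l.Pairwise (fun a b => a ≤ b) := by
      rw [List.pairwise_iff_getElem]
      intro i j hi hj hij
      have := getD_mono_of_adj l (fun k hk => h k hk) j hj i (by omega)
      rwa [List.getD_eq_getElem l 0 hi, List.getD_eq_getElem l 0 hj] at this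
    exact (PySem.List.sorted_eq_self_of_pairwise l (fun x => x) hp).symm

-- non-increasing ↔ list equals its reverse-sorted form
lemma eq_sorted_rev_iff (l : List Int) :
    l = PySem.List.sorted l (fun x => x) true
      ↔ ∀ (k : Nat), k + 1 < l.length → ¬ decide (l.getD k 0 < l.getD (k+1) 0) = true := by
  simp only [decide_eq_true_eq, not_lt]
  constructor
  · intro h k hk
    have hp := PySem.List.sorted_pairwise_rev (xs := l) (key := fun x => x)
    rw [← h] at hp
    have := List.pairwise_iff_getElem.1 hp k (k+1) (by omega) (by omega) (by omega)
    rwa [List.getD_eq_getElem l 0 (by omega), List.getD_eq_getElem l 0 (by omega)]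
  · intro h
    have hp : l.Pairwise (fun a b => b ≤ a) := by
      rw [List.pairwise_iff_getElem]
      intro i j hi hj hij
      have := getD_anti_of_adj l (fun k hk => h k hk) j hj i (by omega)
      rwa [List.getD_eq_getElem l 0 hi, List.getD_eq_getElem l 0 hj] at this
    exact (PySem.List.sorted_rev_eq_self_of_pairwise l (fun x => x) hp).symm

-- ===== VERDICT (by name: the statement is the Claim_ definition above) =====
theorem isDecreaseOrIncrease_spec : Claim_equal_isDecreaseOrIncrease := by
  intro l _
  unfold Spec_isDecreaseOrIncrease isDecreaseOrIncrease isDecreaseOrIncrease_alt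
  rw [foldA_eq]
  have hI : ((PySem.List.pyRange 0 ((l.length : Int) - 1) 1).all
      (fun i => !decide (PySem.List.pyGetD l i 0 > PySem.List.pyGetD l (i+1) 0))) = true
      ↔ l = PySem.List.sorted l (fun x => x) false :=
    (all_range_iff l (fun a b => decide (a > b))).trans (eq_sorted_iff l).symm
  have hD : ((PySem.List.pyRange 0 ((l.length : Int) - 1) 1).all
      (fun i => !decide (PySem.List.pyGetD l i 0 < PySem.List.pyGetD l (i+1) 0))) = true
      ↔ l = PySem.List.sorted l (fun x => x) true :=
    (all_range_iff l (fun a b => decide (a < b))).trans (eq_sorted_rev_iff l).symm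
  have hgt := fun (hb : _) => hI.1 hb
  have hlt := fun (hb : _) => hD.1 hb
  by_cases hi : l = PySem.List.sorted l (fun x => x) false
  · rw [if_pos hi]
    simp [hI.2 hi]
  · have egt : ((PySem.List.pyRange 0 ((l.length : Int) - 1) 1).all
        (fun i => !decide (PySem.List.pyGetD l i 0 > PySem.List.pyGetD l (i+1) 0))) = false :=
      Bool.eq_false_iff.mpr (fun hb => hi (hgt hb))
    by_cases hd : l = PySem.List.sorted l (fun x => x) true
    · rw [if_neg hi, if_pos hd]
      simp [egt, hD.2 hd]
    · have elt : ((PySem.List.pyRange 0 ((l.length : Int) - 1) 1).all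
          (fun i => !decide (PySem.List.pyGetD l i 0 < PySem.List.pyGetD l (i+1) 0))) = false :=
        Bool.eq_false_iff.mpr (fun hb => hd (hlt hb))
      rw [if_neg hi, if_neg hd]
      simp [egt, elt]
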